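-- pv_equiv track=rewrite | github.com/Karobben/GAT_regression | src/data/pdb_to_graph.py | sort_residues_by_chain
-- ===== SOURCE A (Python) =====
-- from typing import List, Optional, Tuple, Dict
--
-- def sort_residues_by_chain(
--     chain_ids: List[str],
--     residue_info: List[Tuple[str, int, str]]
-- ) -> List[int]:
--     """
--     Sort residues within each chain by (resseq, insertion_code) and return sorted indices.
--
--     Args:
--         chain_ids: List of chain IDs for each residue (in original order)
--         residue_info: List of (chain_id, resseq, insertion_code) tuples
--
--     Returns:
--         sorted_indices: List of indices that sort residues within each chain
--     """
--     N = len(chain_ids)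
--     indices = list(range(N))
--
--     # Group by chain
--     chain_groups = {}
--     for i, chain_id in enumerate(chain_ids):
--         if chain_id not in chain_groups:
--             chain_groups[chain_id] = []
--         chain_groups[chain_id].append(i)
--
--     # Sort within each chain by (resseq, insertion_code)
--     sorted_indices = []
--     for chain_id in sorted(chain_groups.keys()):
--         chain_indices = chain_groups[chain_id]
--         # Sort by (resseq, insertion_code)
--         chain_indices_sorted = sorted(
--             chain_indices,
--             key=lambda i: (residue_info[i][1], residue_info[i][2] or " ")
--         )
--         sorted_indices.extend(chain_indices_sorted)
--
--     # Create mapping from original index to sorted index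
--     index_map = {sorted_idx: orig_idx for orig_idx, sorted_idx in enumerate(sorted_indices)}
--     # Return indices that map original -> sorted
--     return [index_map[i] for i in range(N)]
-- ===== SOURCE B (Python) =====
-- def sort_residues_by_chain(chain_ids, residue_info):
--     N = len(chain_ids)
--     # stable two-pass sort: secondary key first, then chain (radix idiom)
--     order = sorted(range(N), key=lambda i: (residue_info[i][1], residue_info[i][2] or " "))
--     order = sorted(order, key=lambda i: chain_ids[i])
--     rank = [0] * N
--     for pos, idx in enumerate(order):
--         rank[idx] = pos
--     return rank
-- ===== Notes on version B (the rewrite author's own statement) =====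
-- stated objective: simpler
-- what changed: Replaces the dict-grouping, per-chain sort, concatenation and inverse-index dict of A with two stable whole-array sorts (secondary key first, then chain id - the radix idiom) followed by a single scatter loop building the rank array.
import Mathlib
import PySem

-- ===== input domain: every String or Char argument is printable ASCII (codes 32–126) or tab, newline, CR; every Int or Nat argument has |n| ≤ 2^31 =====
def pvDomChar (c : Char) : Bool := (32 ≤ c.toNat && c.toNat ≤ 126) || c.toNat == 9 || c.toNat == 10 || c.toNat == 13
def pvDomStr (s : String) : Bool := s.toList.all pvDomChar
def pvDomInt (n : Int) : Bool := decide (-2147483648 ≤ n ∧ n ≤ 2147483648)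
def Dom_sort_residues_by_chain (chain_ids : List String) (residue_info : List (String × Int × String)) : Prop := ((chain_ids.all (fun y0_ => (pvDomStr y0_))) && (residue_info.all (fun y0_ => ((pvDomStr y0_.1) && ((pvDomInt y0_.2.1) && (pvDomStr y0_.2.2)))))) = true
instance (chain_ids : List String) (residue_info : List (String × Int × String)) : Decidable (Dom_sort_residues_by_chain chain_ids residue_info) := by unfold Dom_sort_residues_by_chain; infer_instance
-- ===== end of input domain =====

-- B replaces A's dict-grouping + per-chain sorts + concatenation + inverse-index dict by two stable
-- whole-array sorts (secondary key first, then chain — the radix idiom) and one scatter loop: simpler.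

-- ===== PORT A =====
-- the Python sort key  lambda i: (residue_info[i][1], residue_info[i][2] or " ")  (shared by both ports,
-- both Pythons contain this same lambda); the .getD default is unreachable under Pre_ (Python raises
-- IndexError on an out-of-range i, which Pre_ excludes).
def pvK1 (residue_info : List (String × Int × String)) (i : Int) : Int :=
  ((PySem.List.pyGet? residue_info i).getD ("", 0, "")).2.1
def pvK2 (residue_info : List (String × Int × String)) (i : Int) : String :=
  let s := ((PySem.List.pyGet? residue_info i).getD ("", 0, "")).2.2
  if s = "" then " " else s

-- the grouping loop of A:  if chain_id not in chain_groups: chain_groups[chain_id] = [];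
--                          chain_groups[chain_id].append(i)
def pvGroups (chain_ids : List String) : PySem.Dict String (List Int) :=
  chain_ids.zipIdx.foldl (fun d p =>
    let d' := if d.contains p.1 then d else d.insert p.1 ([] : List Int)
    d'.modify p.1 [] (fun l => l ++ [(p.2 : Int)])) PySem.Dict.empty

def sort_residues_by_chain (chain_ids : List String) (residue_info : List (String × Int × String)) : List Int :=
  let N : Int := (chain_ids.length : Int)
  let _indices := PySem.List.pyRange 0 N          -- dead in the Python too
  let chain_groups := pvGroups chain_ids
  let sorted_indices : List Int :=
    (PySem.List.sorted chain_groups.keys (fun k => k)).foldl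
      (fun acc cid => acc ++ PySem.List.sorted2 (chain_groups.getD cid [])
        (pvK1 residue_info) (pvK2 residue_info)) []
  -- index_map = {sorted_idx: orig_idx for orig_idx, sorted_idx in enumerate(sorted_indices)}
  let index_map : PySem.Dict Int Int :=
    sorted_indices.zipIdx.foldl (fun d q => d.insert q.1 ((q.2 : Nat) : Int)) PySem.Dict.empty
  -- Python's index_map[i]: the key is always present (sorted_indices is a permutation of range(N)),
  -- so the 0 default of getD is never taken.
  (PySem.List.pyRange 0 N).map (fun i => index_map.getD i 0)

-- ===== PORT B =====
-- chain_ids[i] for the second sort key (i is always in range: it comes from range(N))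
def pvChain (chain_ids : List String) (i : Int) : String := (PySem.List.pyGet? chain_ids i).getD ""

def sort_residues_by_chain_alt (chain_ids : List String) (residue_info : List (String × Int × String)) : List Int :=
  let N : Int := (chain_ids.length : Int)
  let order1 := PySem.List.sorted2 (PySem.List.pyRange 0 N) (pvK1 residue_info) (pvK2 residue_info)
  let order := PySem.List.sorted order1 (pvChain chain_ids)
  let rank := List.replicate chain_ids.length (0 : Int)
  -- for pos, idx in enumerate(order): rank[idx] = pos   (idx ∈ range(N), so idx.toNat is exact)
  order.zipIdx.foldl (fun acc q => acc.set q.1.toNat ((q.2 : Nat) : Int)) rank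

-- ===== PRECONDITION & SPEC =====
-- Pre_ excludes exactly the inputs on which Python A raises IndexError: some residue index
-- i < len(chain_ids) with i >= len(residue_info) is reached by the sort-key lambda.
def Pre_sort_residues_by_chain (chain_ids : List String) (residue_info : List (String × Int × String)) : Prop :=
  chain_ids.length ≤ residue_info.length
instance (chain_ids : List String) (residue_info : List (String × Int × String)) : Decidable (Pre_sort_residues_by_chain chain_ids residue_info) := by unfold Pre_sort_residues_by_chain; infer_instance

def pvWitness_sort_residues_by_chain : List String × (List (String × Int × String)) :=
  (["A", "A", "B"], [("A", 2, ""), ("A", 1, "B"), ("B", 5, "")])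

def Spec_sort_residues_by_chain (chain_ids : List String) (residue_info : List (String × Int × String)) (out : List Int) : Prop := out = sort_residues_by_chain_alt chain_ids residue_info
instance (chain_ids : List String) (residue_info : List (String × Int × String)) (out : List Int) : Decidable (Spec_sort_residues_by_chain chain_ids residue_info out) := by unfold Spec_sort_residues_by_chain; infer_instance

-- ===== CLAIM (what is proved, stated in full; the proofs are below) =====
def Claim_equal_sort_residues_by_chain : Prop := ∀ (chain_ids : List String) (residue_info : List (String × Int × String)), Dom_sort_residues_by_chain chain_ids residue_info → Pre_sort_residues_by_chain chain_ids residue_info → Spec_sort_residues_by_chain chain_ids residue_info (sort_residues_by_chain chain_ids residue_info)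

-- ===== LEMMAS AND PROOFS =====

-- ---- stability of PySem's insertion sort ----
-- pvR key s: "key strictly smaller, or keys equal and s" — the pairwise order a stable sort by key
-- produces on an input that is Pairwise s.
def pvR {α κ : Type} [LT κ] (key : α → κ) (s : α → α → Prop) (a b : α) : Prop :=
  key a < key b ∨ (key a = key b ∧ s a b)

theorem pv_insertBy_nil {α : Type} (before : α → α → Bool) (x : α) :
    PySem.List.insertBy before x [] = [x] := rfl

theorem pv_insertBy_cons {α : Type} (before : α → α → Bool) (x y : α) (ys : List α) :
    PySem.List.insertBy before x (y :: ys) =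
      if before x y then x :: y :: ys else y :: PySem.List.insertBy before x ys := rfl

theorem pv_insertBy_pairwise {α κ : Type} [LinearOrder κ] (key : α → κ) (s : α → α → Prop) (x : α) :
    ∀ ys : List α, ys.Pairwise (pvR key s) → (∀ y ∈ ys, s y x) →
    (PySem.List.insertBy (fun a b => decide (key a < key b)) x ys).Pairwise (pvR key s)
  | [], _, _ => by simp [pv_insertBy_nil]
  | y :: ys, h, hx => by
      rcases List.pairwise_cons.mp h with ⟨hy, hys⟩
      rw [pv_insertBy_cons]
      by_cases hlt : key x < key y
      · simp only [hlt, decide_true, if_true]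
        refine List.pairwise_cons.mpr ⟨?_, h⟩
        intro z hz
        rcases List.mem_cons.mp hz with rfl | hz'
        · exact Or.inl hlt
        · rcases hy z hz' with h' | ⟨h', _⟩
          · exact Or.inl (lt_trans hlt h')
          · exact Or.inl (h' ▸ hlt)
      · simp only [hlt, decide_false, Bool.false_eq_true, if_false]
        refine List.pairwise_cons.mpr
          ⟨?_, pv_insertBy_pairwise key s x ys hys (fun y' hy' => hx y' (List.mem_cons_of_mem _ hy'))⟩
        intro z hz
        rcases (PySem.List.mem_insertBy _ x z ys).mp hz with rfl | hz'
        · rcases lt_or_eq_of_le (not_lt.mp hlt) with h' | h'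
          · exact Or.inl h'
          · exact Or.inr ⟨h', hx y (List.mem_cons_self ..)⟩
        · exact hy z hz'

theorem pv_foldl_insertBy_pairwise {α κ : Type} [LinearOrder κ] (key : α → κ) (s : α → α → Prop) :
    ∀ (xs acc : List α), acc.Pairwise (pvR key s) → (∀ a ∈ acc, ∀ b ∈ xs, s a b) → xs.Pairwise s →
    (xs.foldl (fun acc x => PySem.List.insertBy (fun a b => decide (key a < key b)) x acc) acc).Pairwise (pvR key s)
  | [], acc, hacc, _, _ => hacc
  | x :: xs, acc, hacc, hcross, hxs => by
      simp only [List.foldl_cons]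
      rcases List.pairwise_cons.mp hxs with ⟨hx, hxs'⟩
      refine pv_foldl_insertBy_pairwise key s xs _
        (pv_insertBy_pairwise key s x acc hacc (fun y hy => hcross y hy x (List.mem_cons_self ..)))
        ?_ hxs'
      intro a ha b hb
      rcases (PySem.List.mem_insertBy _ x a acc).mp ha with rfl | ha'
      · exact hx b hb
      · exact hcross a ha' b (List.mem_cons_of_mem _ hb)

theorem pv_sorted_stable {α κ : Type} [LinearOrder κ] (xs : List α) (key : α → κ) (s : α → α → Prop)
    (h : xs.Pairwise s) : (PySem.List.sorted xs key).Pairwise (pvR key s) := by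
  rw [PySem.List.sorted_eq_foldl_insertBy]
  exact pv_foldl_insertBy_pairwise key s xs [] List.Pairwise.nil (by simp) h

-- sorted2's comparison is exactly the strict lexicographic order on the tuple key
theorem pv_before_eq {α : Type} (k1 : α → Int) (k2 : α → String) (a b : α) :
    (decide (k1 a < k1 b) || !decide (k1 b < k1 a) && decide (k2 a < k2 b))
      = decide ((toLex (k1 a, k2 a) : Lex (Int × String)) < toLex (k1 b, k2 b)) := by
  rcases lt_trichotomy (k1 a) (k1 b) with h | h | h
  · simp [h, Prod.Lex.lt_iff]
  · simp [h, Prod.Lex.lt_iff]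
  · simp [h, asymm h, Prod.Lex.lt_iff, (ne_of_gt h)]

theorem pv_sorted2_eq {α : Type} (xs : List α) (k1 : α → Int) (k2 : α → String) :
    PySem.List.sorted2 xs k1 k2 =
      xs.foldl (fun acc x => PySem.List.insertBy
        (fun a b => decide ((toLex (k1 a, k2 a) : Lex (Int × String)) < toLex (k1 b, k2 b))) x acc) [] := by
  have hb : (fun (a b : α) => decide (k1 a < k1 b) || !decide (k1 b < k1 a) && decide (k2 a < k2 b))
      = (fun a b => decide ((toLex (k1 a, k2 a) : Lex (Int × String)) < toLex (k1 b, k2 b))) :=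
    funext fun a => funext fun b => pv_before_eq k1 k2 a b
  calc PySem.List.sorted2 xs k1 k2
      = xs.foldl (fun acc x => PySem.List.insertBy
          (fun a b => decide (k1 a < k1 b) || !decide (k1 b < k1 a) && decide (k2 a < k2 b)) x acc) [] := rfl
    _ = _ := by rw [hb]

theorem pv_sorted2_stable {α : Type} (xs : List α) (k1 : α → Int) (k2 : α → String) (s : α → α → Prop)
    (h : xs.Pairwise s) :
    (PySem.List.sorted2 xs k1 k2).Pairwise
      (pvR (fun x => (toLex (k1 x, k2 x) : Lex (Int × String))) s) := by
  rw [pv_sorted2_eq]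
  exact pv_foldl_insertBy_pairwise _ s xs [] List.Pairwise.nil (by simp) h

theorem pvR_antisymm {α κ : Type} [LinearOrder κ] {key : α → κ} {s : α → α → Prop}
    (hs : ∀ a b, s a b → s b a → a = b) :
    ∀ a b, pvR key s a b → pvR key s b a → a = b := by
  intro a b h1 h2
  rcases h1 with h1 | ⟨e1, h1⟩ <;> rcases h2 with h2 | ⟨e2, h2⟩
  · exact absurd h2 (lt_asymm h1)
  · exact absurd (e2 ▸ h1) (lt_irrefl _)
  · exact absurd (e1 ▸ h2) (lt_irrefl _)
  · exact hs a b h1 h2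

-- ---- pyRange facts ----
theorem pv_pyRange_mem (n : Nat) (i : Int) :
    i ∈ PySem.List.pyRange 0 (n : Int) ↔ 0 ≤ i ∧ i < (n : Int) := by
  rw [PySem.List.pyRange_zero_natCast]
  simp only [List.mem_map, List.mem_range]
  constructor
  · rintro ⟨k, hk, rfl⟩; omega
  · intro ⟨h0, hn⟩; exact ⟨i.toNat, by omega, by omega⟩

theorem pv_pyRange_pairwise (n : Nat) :
    (PySem.List.pyRange 0 (n : Int)).Pairwise (· < ·) := by
  rw [PySem.List.pyRange_zero_natCast]
  exact List.pairwise_map.mpr (List.pairwise_lt_range.imp (by intro a b h; exact_mod_cast h))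

theorem pv_pyRange_nodup (n : Nat) : (PySem.List.pyRange 0 (n : Int)).Nodup := by
  rw [PySem.List.pyRange_zero_natCast]
  exact List.nodup_range.map (fun a b h => by exact_mod_cast h)

theorem pv_pyRange_length (n : Nat) : (PySem.List.pyRange 0 (n : Int)).length = n := by
  rw [PySem.List.pyRange_zero_natCast]; simp

-- ---- the grouped lists of A ----
def pvL (chain_ids : List String) : List (String × Int) :=
  chain_ids.zipIdx.map (fun p => (p.1, (p.2 : Int)))

def pvGroup (chain_ids : List String) (c : String) : List Int :=
  ((pvL chain_ids).filter (fun p => p.1 == c)).map (fun p => p.2)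

theorem pv_groups_eq (cids : List String) :
    pvGroups cids =
      (pvL cids).foldl (fun d p => d.modify p.1 [] (fun l => l ++ [p.2])) PySem.Dict.empty := by
  unfold pvGroups pvL
  rw [List.foldl_map]
  apply PySem.List.foldl_congr_mem
  intro d p _
  dsimp only
  by_cases h : d.contains p.1
  · simp [h]
  · rw [if_neg (by simpa using h)]
    simp only [PySem.Dict.modify, PySem.Dict.getD_insert_self, PySem.Dict.insert_insert_self,
      PySem.Dict.getD_of_not_contains _ _ (by simpa using h)]

theorem pv_groups_getD (cids : List String) (c : String) :
    (pvGroups cids).getD c [] = pvGroup cids c := by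
  rw [pv_groups_eq, PySem.Dict.getD_foldl_modify_append]
  simp [pvGroup, PySem.Dict.getD_empty]

theorem pv_groups_keys (cids : List String) :
    (pvGroups cids).keys = PySem.Set.ofList cids := by
  rw [pv_groups_eq,
    PySem.Dict.keys_foldl_modify_key (pvL cids) (fun p => p.1) [] (fun _ p => (· ++ [p.2]))
      PySem.Dict.empty]
  have h1 : (pvL cids).map (fun p => p.1) = cids := by
    simp [pvL, List.map_map, Function.comp_def, List.zipIdx_map_fst]
  rw [h1]
  rfl

theorem pv_mem_L {cids : List String} {p : String × Int} (h : p ∈ pvL cids) :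
    0 ≤ p.2 ∧ p.2 < (cids.length : Int) ∧ pvChain cids p.2 = p.1 ∧ p.1 ∈ cids := by
  unfold pvL at h
  rcases List.mem_map.mp h with ⟨q, hq, rfl⟩
  obtain ⟨a, i⟩ := q
  obtain ⟨-, hlt, heq⟩ := List.mem_zipIdx hq
  simp only [Nat.zero_add, Nat.sub_zero] at hlt heq
  dsimp only
  refine ⟨by positivity, by exact_mod_cast hlt, ?_, by rw [heq]; exact List.getElem_mem _⟩
  unfold pvChain
  rw [PySem.List.pyGet?_natCast, List.getElem?_eq_getElem hlt]
  simp [heq]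

theorem pv_L_snd (cids : List String) :
    (pvL cids).map (fun p => p.2) = PySem.List.pyRange 0 (cids.length : Int) := by
  unfold pvL
  rw [PySem.List.pyRange_zero_natCast, List.map_map]
  have h1 : ((fun p : String × Int => p.2) ∘ (fun p : String × Nat => (p.1, (p.2 : Int))))
      = (fun k : Nat => (k : Int)) ∘ Prod.snd := rfl
  rw [h1, ← List.map_map, List.zipIdx_map_snd, ← List.range_eq_range']

theorem pv_L_pairwise (cids : List String) : (pvL cids).Pairwise (fun p q => p.2 < q.2) := by
  unfold pvL
  rw [List.pairwise_map]
  have h : cids.zipIdx.Pairwise (fun p q => p.2 < q.2) := by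
    have hr := List.pairwise_lt_range' (s := 0) (n := cids.length) 1
    rw [← List.zipIdx_map_snd (l := cids)] at hr
    exact List.pairwise_map.mp hr
  refine h.imp ?_
  intro p q hpq
  dsimp only
  exact_mod_cast hpq

theorem pv_group_pairwise (cids : List String) (c : String) :
    (pvGroup cids c).Pairwise (· < ·) := by
  unfold pvGroup
  exact List.pairwise_map.mpr (List.Pairwise.sublist List.filter_sublist (pv_L_pairwise cids))

theorem pv_group_mem {cids : List String} {c : String} {i : Int} (h : i ∈ pvGroup cids c) :
    pvChain cids i = c ∧ 0 ≤ i ∧ i < (cids.length : Int) := by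
  unfold pvGroup at h
  rcases List.mem_map.mp h with ⟨p, hp, rfl⟩
  rcases List.mem_filter.mp hp with ⟨hpL, hbeq⟩
  obtain ⟨h0, hlt, hchain, -⟩ := pv_mem_L hpL
  exact ⟨hchain.trans (eq_of_beq hbeq), h0, hlt⟩

-- ---- partition permutation ----
theorem pv_flatMap_congr {γ δ : Type} (l : List γ) (f g : γ → List δ) (h : ∀ a ∈ l, f a = g a) :
    l.flatMap f = l.flatMap g := by
  induction l with
  | nil => rfl
  | cons x l ih =>
      rw [List.flatMap_cons, List.flatMap_cons, h x (List.mem_cons_self ..),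
        ih (fun a ha => h a (List.mem_cons_of_mem _ ha))]

theorem pv_flatMap_perm_congr {γ δ : Type} (l : List γ) (f g : γ → List δ)
    (h : ∀ a ∈ l, (f a).Perm (g a)) : (l.flatMap f).Perm (l.flatMap g) := by
  induction l with
  | nil => exact List.Perm.refl _
  | cons x l ih =>
      rw [List.flatMap_cons, List.flatMap_cons]
      exact (h x (List.mem_cons_self ..)).append (ih (fun a ha => h a (List.mem_cons_of_mem _ ha)))

theorem pv_partition_perm {β κ : Type} [BEq κ] [LawfulBEq κ] (key : β → κ) :
    ∀ (C : List κ) (L : List β), C.Nodup → (∀ b ∈ L, key b ∈ C) →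
    (C.flatMap (fun c => L.filter (fun b => key b == c))).Perm L
  | [], L, _, hcov => by
      cases L with
      | nil => simp
      | cons b L => exact absurd (hcov b (List.mem_cons_self ..)) (List.not_mem_nil)
  | c :: C, L, hnd, hcov => by
      rcases List.nodup_cons.mp hnd with ⟨hcC, hndC⟩
      rw [List.flatMap_cons]
      have hrw : C.flatMap (fun c' => L.filter (fun b => key b == c'))
          = C.flatMap (fun c' => (L.filter (fun b => !(key b == c))).filter (fun b => key b == c')) := by
        apply pv_flatMap_congr
        intro c' hc'
        rw [List.filter_filter]
        apply List.filter_congr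
        intro b _
        by_cases h : (key b == c') = true
        · have hne : (key b == c) = false := by
            refine beq_eq_false_iff_ne.mpr ?_
            intro e
            exact hcC (by rwa [← eq_of_beq h, e] at hc')
          simp [h, hne]
        · simp [h]
      rw [hrw]
      have hcov2 : ∀ b ∈ L.filter (fun b => !(key b == c)), key b ∈ C := by
        intro b hb
        rcases List.mem_filter.mp hb with ⟨hbL, hbne⟩
        rcases List.mem_cons.mp (hcov b hbL) with h | h
        · exact absurd h (by simpa using hbne)
        · exact h
      have hperm := pv_partition_perm key C (L.filter (fun b => !(key b == c))) hndC hcov2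
      exact (List.Perm.append_left _ hperm).trans (List.filter_append_perm _ L)

-- ---- the two pipelines produce the same permutation of range(N) ----
theorem pv_A_perm (cids : List String) (ri : List (String × Int × String)) :
    ((PySem.List.sorted (PySem.Set.ofList cids) (fun k => k)).flatMap
        (fun c => PySem.List.sorted2 (pvGroup cids c) (pvK1 ri) (pvK2 ri))).Perm
      (PySem.List.pyRange 0 (cids.length : Int)) := by
  have hC : (PySem.List.sorted (PySem.Set.ofList cids) (fun k => k)).Nodup :=
    (PySem.List.sorted_perm _ _ _).symm.nodup (PySem.Set.nodup_ofList cids)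
  have h1 := pv_flatMap_perm_congr (PySem.List.sorted (PySem.Set.ofList cids) (fun k => k))
    (fun c => PySem.List.sorted2 (pvGroup cids c) (pvK1 ri) (pvK2 ri)) (fun c => pvGroup cids c)
    (fun c _ => PySem.List.sorted2_perm _ _ _ _)
  have h2 : (PySem.List.sorted (PySem.Set.ofList cids) (fun k => k)).flatMap (fun c => pvGroup cids c)
      = ((PySem.List.sorted (PySem.Set.ofList cids) (fun k => k)).flatMap
          (fun c => (pvL cids).filter (fun p => p.1 == c))).map (fun p => p.2) := by
    rw [List.map_flatMap]
    rfl
  have h3 : (((PySem.List.sorted (PySem.Set.ofList cids) (fun k => k)).flatMap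
      (fun c => (pvL cids).filter (fun p => p.1 == c))).map (fun p => p.2)).Perm
        ((pvL cids).map (fun p => p.2)) := by
    refine List.Perm.map _ (pv_partition_perm (β := String × Int) (κ := String) (fun p => p.1) _ _ hC ?_)
    intro b hb
    obtain ⟨h0, hlt, hchain, hmem⟩ := pv_mem_L hb
    rw [PySem.List.mem_sorted]
    exact (PySem.Set.mem_ofList cids b.1).mpr hmem
  refine h1.trans (h2 ▸ (h3.trans ?_))
  rw [pv_L_snd]

theorem pv_A_pairwise (cids : List String) (ri : List (String × Int × String)) :
    ((PySem.List.sorted (PySem.Set.ofList cids) (fun k => k)).flatMap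
        (fun c => PySem.List.sorted2 (pvGroup cids c) (pvK1 ri) (pvK2 ri))).Pairwise
      (pvR (pvChain cids) (pvR (fun i => (toLex (pvK1 ri i, pvK2 ri i) : Lex (Int × String))) (· < ·))) := by
  rw [List.pairwise_flatMap]
  constructor
  · intro c _
    have hst := pv_sorted2_stable (pvGroup cids c) (pvK1 ri) (pvK2 ri) (· < ·) (pv_group_pairwise cids c)
    refine hst.imp_of_mem ?_
    intro a b ha hb hab
    have hca := (pv_group_mem ((PySem.List.sorted2_perm _ _ _ _).mem_iff.mp ha)).1
    have hcb := (pv_group_mem ((PySem.List.sorted2_perm _ _ _ _).mem_iff.mp hb)).1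
    exact Or.inr ⟨hca.trans hcb.symm, hab⟩
  · have hC := PySem.List.sorted_ofList_pairwise_lt cids
    refine hC.imp ?_
    intro c c' hlt x hx y hy
    have hcx := (pv_group_mem ((PySem.List.sorted2_perm _ _ _ _).mem_iff.mp hx)).1
    have hcy := (pv_group_mem ((PySem.List.sorted2_perm _ _ _ _).mem_iff.mp hy)).1
    exact Or.inl (by rw [hcx, hcy]; exact hlt)

theorem pv_orders_eq (cids : List String) (ri : List (String × Int × String)) :
    (PySem.List.sorted (PySem.Set.ofList cids) (fun k => k)).flatMap
        (fun c => PySem.List.sorted2 (pvGroup cids c) (pvK1 ri) (pvK2 ri))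
      = PySem.List.sorted
          (PySem.List.sorted2 (PySem.List.pyRange 0 (cids.length : Int)) (pvK1 ri) (pvK2 ri))
          (pvChain cids) := by
  have hanti := pvR_antisymm (key := pvChain cids)
    (pvR_antisymm (key := fun i => (toLex (pvK1 ri i, pvK2 ri i) : Lex (Int × String)))
      (s := (· < · : Int → Int → Prop)) (fun a b h1 h2 => by omega))
  refine List.Perm.eq_of_pairwise (fun a b _ _ => hanti a b) (pv_A_pairwise cids ri) ?_ ?_
  · exact pv_sorted_stable _ (pvChain cids) _
      (pv_sorted2_stable _ (pvK1 ri) (pvK2 ri) (· < ·) (pv_pyRange_pairwise cids.length))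
  · exact (pv_A_perm cids ri).trans
      (((PySem.List.sorted_perm _ _ _).trans (PySem.List.sorted2_perm _ _ _ _)).symm)

-- ---- reading the inverse map (A) and the scatter loop (B) ----
theorem pv_find : ∀ (p : List Int) (k : Nat) (i : Int), i ∈ p →
    ((p.zipIdx k).map (fun q => (q.1, ((q.2 : Nat) : Int)))).find? (fun pr => pr.1 == i)
      = some (i, ((k + p.idxOf i : Nat) : Int))
  | [], _, _, h => absurd h (List.not_mem_nil)
  | x :: rest, k, i, h => by
      rw [List.zipIdx_cons, List.map_cons, List.find?_cons]
      by_cases he : x = i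
      · subst he
        simp
      · have hb : (x == i) = false := beq_eq_false_iff_ne.mpr he
        have hmem : i ∈ rest := by
          rcases List.mem_cons.mp h with h' | h'
          · exact absurd h'.symm he
          · exact h'
        simp only [hb]
        rw [pv_find rest (k + 1) i hmem]
        simp only [List.idxOf_cons, hb, cond_false]
        congr 2
        omega

theorem pv_read (p : List Int) (hnd : p.Nodup) {i : Int} (hi : i ∈ p) :
    (p.zipIdx.foldl (fun d q => d.insert q.1 ((q.2 : Nat) : Int)) PySem.Dict.empty).getD i 0
      = ((p.idxOf i : Nat) : Int) := by
  have hitems := PySem.Dict.items_foldl_insert_fresh p.zipIdx (fun q => q.1)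
    (fun q => ((q.2 : Nat) : Int)) PySem.Dict.empty
    (fun a _ => PySem.Dict.contains_empty _) (by rw [List.zipIdx_map_fst]; exact hnd)
  rw [PySem.Dict.getD, PySem.Dict.get?, hitems]
  simp only [PySem.Dict.empty, List.nil_append]
  rw [pv_find p 0 i hi]
  simp

theorem pv_zipIdx_fst_mem {l : List Int} {k : Nat} {q : Int × Nat} (h : q ∈ l.zipIdx k) : q.1 ∈ l := by
  obtain ⟨a, b⟩ := q
  obtain ⟨-, h2, heq⟩ := List.mem_zipIdx h
  dsimp only
  rw [heq]
  exact List.getElem_mem _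

theorem pv_scatter_len : ∀ (l : List (Int × Nat)) (acc : List Int),
    (l.foldl (fun acc q => acc.set q.1.toNat ((q.2 : Nat) : Int)) acc).length = acc.length
  | [], _ => rfl
  | q :: l, acc => by rw [List.foldl_cons, pv_scatter_len l _, List.length_set]

theorem pv_scatter_skip : ∀ (l : List (Int × Nat)) (acc : List Int) (j : Nat),
    (∀ q ∈ l, 0 ≤ q.1) → (∀ q ∈ l, q.1 ≠ (j : Int)) →
    (l.foldl (fun acc q => acc.set q.1.toNat ((q.2 : Nat) : Int)) acc)[j]? = acc[j]?
  | [], _, _, _, _ => rfl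
  | q :: l, acc, j, hpos, hne => by
      rw [List.foldl_cons,
        pv_scatter_skip l _ j (fun q hq => hpos q (List.mem_cons_of_mem _ hq))
          (fun q hq => hne q (List.mem_cons_of_mem _ hq)),
        List.getElem?_set_ne]
      have h1 := hpos q (List.mem_cons_self ..)
      have h2 := hne q (List.mem_cons_self ..)
      omega

theorem pv_scatter_hit : ∀ (p : List Int) (k : Nat) (acc : List Int) (i : Int),
    p.Nodup → (∀ x ∈ p, 0 ≤ x) → i ∈ p → i.toNat < acc.length →
    ((p.zipIdx k).foldl (fun acc q => acc.set q.1.toNat ((q.2 : Nat) : Int)) acc)[i.toNat]?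
      = some ((k + p.idxOf i : Nat) : Int)
  | [], _, _, _, _, _, hi, _ => absurd hi (List.not_mem_nil)
  | x :: rest, k, acc, i, hnd, hpos, hi, hlen => by
      rcases List.nodup_cons.mp hnd with ⟨hxrest, hndr⟩
      have hx0 : 0 ≤ x := hpos x (List.mem_cons_self ..)
      rw [List.zipIdx_cons, List.foldl_cons]
      by_cases he : x = i
      · subst he
        rw [pv_scatter_skip (rest.zipIdx (k + 1)) _ x.toNat
            (fun q hq => hpos q.1 (List.mem_cons_of_mem _ (pv_zipIdx_fst_mem hq)))
            (fun q hq => by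
              have hqm := pv_zipIdx_fst_mem hq
              intro e
              rw [show ((x.toNat : Nat) : Int) = x from by omega] at e
              exact hxrest (e ▸ hqm))]
        rw [List.getElem?_set_self (by omega)]
        simp
      · have hb : (x == i) = false := beq_eq_false_iff_ne.mpr he
        have hmem : i ∈ rest := by
          rcases List.mem_cons.mp hi with h' | h'
          · exact absurd h'.symm he
          · exact h'
        rw [pv_scatter_hit rest (k + 1) _ i hndr
            (fun y hy => hpos y (List.mem_cons_of_mem _ hy)) hmem
            (by rw [List.length_set]; exact hlen)]
        simp only [List.idxOf_cons, hb, cond_false]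
        congr 2
        omega

-- ===== VERDICT (by name: the statement is the Claim_ definition above) =====
theorem sort_residues_by_chain_spec : Claim_equal_sort_residues_by_chain := by
  unfold Claim_equal_sort_residues_by_chain
  intro cids ri _ _
  unfold Spec_sort_residues_by_chain
  unfold sort_residues_by_chain sort_residues_by_chain_alt
  simp only [pv_groups_keys, pv_groups_getD]
  rw [PySem.List.foldl_append_eq_flatMap, List.nil_append, pv_orders_eq cids ri]
  set p := PySem.List.sorted
    (PySem.List.sorted2 (PySem.List.pyRange 0 (cids.length : Int)) (pvK1 ri) (pvK2 ri))
    (pvChain cids) with hp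
  have hperm : p.Perm (PySem.List.pyRange 0 (cids.length : Int)) :=
    (PySem.List.sorted_perm _ _ _).trans (PySem.List.sorted2_perm _ _ _ _)
  have hnodup : p.Nodup := hperm.symm.nodup (pv_pyRange_nodup cids.length)
  have hmem : ∀ i : Int, i ∈ p ↔ 0 ≤ i ∧ i < (cids.length : Int) :=
    fun i => hperm.mem_iff.trans (pv_pyRange_mem cids.length i)
  have hpos : ∀ x ∈ p, 0 ≤ x := fun x hx => ((hmem x).mp hx).1
  apply List.ext_getElem
  · rw [List.length_map, pv_pyRange_length, pv_scatter_len, List.length_replicate]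
  · intro j hj1 hj2
    rw [List.length_map, pv_pyRange_length] at hj1
    have hjp : ((j : Nat) : Int) ∈ p := (hmem _).mpr ⟨by positivity, by exact_mod_cast hj1⟩
    have hL : (PySem.List.pyRange 0 (cids.length : Int))[j]'(by rwa [pv_pyRange_length]) = ((j : Nat) : Int) := by
      have h := PySem.List.pyRange_zero_natCast cids.length
      simp [h]
    rw [List.getElem_map, hL, pv_read p hnodup hjp]
    have hscat := pv_scatter_hit p 0 (List.replicate cids.length (0 : Int)) ((j : Nat) : Int)
      hnodup hpos hjp (by simpa using hj1)
    have htoNat : (((j : Nat) : Int)).toNat = j := by omega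
    rw [htoNat] at hscat
    have hsome := List.getElem?_eq_getElem (l := (p.zipIdx.foldl
      (fun acc q => acc.set q.1.toNat ((q.2 : Nat) : Int)) (List.replicate cids.length (0 : Int)))) (i := j)
      (by rwa [pv_scatter_len, List.length_replicate])
    rw [hsome] at hscat
    rw [Option.some.inj hscat]
    simp
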